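-- pv_equiv track=rewrite | github.com/sachabroute/MIASHS | napoleon-old.py | cheat_ordonne
-- ===== SOURCE A (Python) =====
-- def cheat_ordonne(shuffled, lignes, colonnes):
--     ordered = [[],[],[],[]]
--     indice_vide = 0
--     for y in range(lignes):
--         for x in range(colonnes + 1):
--             if shuffled[y][x][0] == "C":
--                 ordered[0].append(shuffled[y][x])
--             elif shuffled[y][x][0] == "D":
--                 ordered[1].append(shuffled[y][x])
--             elif shuffled[y][x][0] == "H":
--                 ordered[2].append(shuffled[y][x])
--             elif shuffled[y][x][0] == "S":
--                 ordered[3].append(shuffled[y][x])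
--             elif shuffled[y][x][0] == "V":
--                 ordered[indice_vide].append(shuffled[y][x])
--                 indice_vide += 1
--
--
--
--     ordered[0].sort()
--     ordered[1].sort()
--     ordered[2].sort()
--     ordered[3].sort()
--
--     return(ordered)
-- ===== SOURCE B (Python) =====
-- def cheat_ordonne(shuffled, lignes, colonnes):
--     # Stage 1: flatten the scanned grid cells into one list (row-major, same order A scans).
--     cells = [shuffled[y][x] for y in range(lignes) for x in range(colonnes + 1)]
--     # Stage 2: the "V" cards in encounter order; the i-th one (if any) joins bucket i.
--     vs = [c for c in cells if c[0] == "V"]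
--     # Stage 3: each bucket is an independent filter per suit plus a slice of vs, sorted.
--     return [sorted([c for c in cells if c[0] == s] + vs[i:i + 1])
--             for i, s in enumerate("CDHS")]
-- ===== Notes on version B (the rewrite author's own statement) =====
-- stated objective: simpler
-- what changed: B replaces A's single stateful distribution pass (mutable buckets plus a running indice_vide counter) by staged passes: flatten the grid into one cell list, then build each bucket as an independent per-suit filter plus a slice of the V-list, sorted in a comprehension.
import Mathlib
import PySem

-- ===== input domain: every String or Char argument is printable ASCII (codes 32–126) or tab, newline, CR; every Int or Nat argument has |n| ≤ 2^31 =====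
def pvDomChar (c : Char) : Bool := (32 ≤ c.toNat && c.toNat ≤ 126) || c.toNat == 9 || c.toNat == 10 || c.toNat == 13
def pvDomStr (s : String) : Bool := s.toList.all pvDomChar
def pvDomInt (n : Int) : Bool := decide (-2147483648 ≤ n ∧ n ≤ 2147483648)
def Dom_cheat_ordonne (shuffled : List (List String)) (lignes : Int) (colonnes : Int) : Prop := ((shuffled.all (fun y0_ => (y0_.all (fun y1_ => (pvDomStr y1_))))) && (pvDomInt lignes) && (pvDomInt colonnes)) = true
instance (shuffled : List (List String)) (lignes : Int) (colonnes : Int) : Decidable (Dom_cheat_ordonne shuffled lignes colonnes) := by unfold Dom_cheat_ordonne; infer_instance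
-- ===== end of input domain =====

-- B replaces A's single stateful distribution pass (mutable buckets + running indice_vide
-- counter) by staged passes: flatten the grid into one cell list, then build each bucket as
-- an independent per-suit filter plus a slice of the V-list, sorted; simpler, same cost.

-- ===== PORT A =====
-- loop body of A's nested scan: the elif chain on shuffled[y][x][0] (card[0] = none is
-- IndexError, excluded by Pre_; ordered[indice_vide] out of range is IndexError, excluded by Pre_)
def pvStepA (st : List (List String) × Int) (card : String) : List (List String) × Int :=
  if PySem.Str.pyGet? card 0 == some 'C' then
    (PySem.List.pySetD st.1 0 (PySem.List.pyGetD st.1 0 [] ++ [card]), st.2)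
  else if PySem.Str.pyGet? card 0 == some 'D' then
    (PySem.List.pySetD st.1 1 (PySem.List.pyGetD st.1 1 [] ++ [card]), st.2)
  else if PySem.Str.pyGet? card 0 == some 'H' then
    (PySem.List.pySetD st.1 2 (PySem.List.pyGetD st.1 2 [] ++ [card]), st.2)
  else if PySem.Str.pyGet? card 0 == some 'S' then
    (PySem.List.pySetD st.1 3 (PySem.List.pyGetD st.1 3 [] ++ [card]), st.2)
  else if PySem.Str.pyGet? card 0 == some 'V' then
    (PySem.List.pySetD st.1 st.2 (PySem.List.pyGetD st.1 st.2 [] ++ [card]), st.2 + 1)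
  else st

def cheat_ordonne (shuffled : List (List String)) (lignes : Int) (colonnes : Int) : List (List String) :=
  let st := (PySem.List.pyRange 0 lignes 1).foldl (fun st y =>
      (PySem.List.pyRange 0 (colonnes + 1) 1).foldl (fun st x =>
        pvStepA st (PySem.List.pyGetD (PySem.List.pyGetD shuffled y []) x "")) st)
    ([[], [], [], []], 0)
  let ordered := st.1
  let ordered := PySem.List.pySetD ordered 0 (PySem.List.sorted (PySem.List.pyGetD ordered 0 []) (fun z => z) false)
  let ordered := PySem.List.pySetD ordered 1 (PySem.List.sorted (PySem.List.pyGetD ordered 1 []) (fun z => z) false)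
  let ordered := PySem.List.pySetD ordered 2 (PySem.List.sorted (PySem.List.pyGetD ordered 2 []) (fun z => z) false)
  let ordered := PySem.List.pySetD ordered 3 (PySem.List.sorted (PySem.List.pyGetD ordered 3 []) (fun z => z) false)
  ordered

-- ===== PORT B =====
-- stage 1: the flattening comprehension (cell = none is excluded by Pre_); stage 2: the
-- "V"-filter (card[0] = none is IndexError, excluded by Pre_); stage 3: the bucket comprehension
def cheat_ordonne_alt (shuffled : List (List String)) (lignes : Int) (colonnes : Int) : List (List String) :=
  let cells := (PySem.List.pyRange 0 lignes 1).flatMap (fun y =>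
    (PySem.List.pyRange 0 (colonnes + 1) 1).map (fun x =>
      PySem.List.pyGetD (PySem.List.pyGetD shuffled y []) x ""))
  let vs := cells.filter (fun c => PySem.Str.pyGet? c 0 == some 'V')
  (PySem.List.enumerate ['C', 'D', 'H', 'S'] 0).map (fun p =>
    PySem.List.sorted (cells.filter (fun c => PySem.Str.pyGet? c 0 == some p.2)
      ++ PySem.List.slice vs (some p.1) (some (p.1 + 1))) (fun z => z) false)

-- ===== PRECONDITION & SPEC =====
-- the cells A scans: rows 0..lignes-1, columns 0..colonnes
def pvCells (shuffled : List (List String)) (lignes : Int) (colonnes : Int) : List String :=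
  (shuffled.take lignes.toNat).flatMap (fun row => row.take (colonnes + 1).toNat)

-- Pre_ excludes exactly the inputs where A raises: an out-of-range row or column index, an
-- empty card string (card[0] is IndexError), or a 5th "V" card (ordered[4] is IndexError);
-- when either loop range is empty (lignes ≤ 0 or colonnes + 1 ≤ 0) nothing is indexed and A returns.
def Pre_cheat_ordonne (shuffled : List (List String)) (lignes : Int) (colonnes : Int) : Prop :=
  (lignes ≤ 0 ∨ colonnes + 1 ≤ 0) ∨
  (lignes ≤ (shuffled.length : Int) ∧
  (∀ row ∈ shuffled.take lignes.toNat, colonnes + 1 ≤ (row.length : Int)) ∧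
  (∀ card ∈ pvCells shuffled lignes colonnes, card ≠ "") ∧
  ((pvCells shuffled lignes colonnes).countP (fun card => PySem.Str.pyGet? card 0 == some 'V')) ≤ 4)
instance (shuffled : List (List String)) (lignes : Int) (colonnes : Int) : Decidable (Pre_cheat_ordonne shuffled lignes colonnes) := by
  unfold Pre_cheat_ordonne; infer_instance
def pvWitness_cheat_ordonne : List (List String) × Int × Int := ([["C1", "D1"], ["V1", "S2"]], 2, 1)

def Spec_cheat_ordonne (shuffled : List (List String)) (lignes : Int) (colonnes : Int) (out : List (List String)) : Prop :=
  out = cheat_ordonne_alt shuffled lignes colonnes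
instance (shuffled : List (List String)) (lignes : Int) (colonnes : Int) (out : List (List String)) : Decidable (Spec_cheat_ordonne shuffled lignes colonnes out) := by
  unfold Spec_cheat_ordonne; infer_instance

-- ===== CLAIM (what is proved, stated in full; the proofs are below) =====
def Claim_equal_cheat_ordonne : Prop := ∀ (shuffled : List (List String)) (lignes : Int) (colonnes : Int), Dom_cheat_ordonne shuffled lignes colonnes → Pre_cheat_ordonne shuffled lignes colonnes → Spec_cheat_ordonne shuffled lignes colonnes (cheat_ordonne shuffled lignes colonnes)

-- ===== LEMMAS AND PROOFS =====

-- first character of a (non-empty) card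
def pvHd (card : String) : Char := card.toList.headD 'A'
-- the cards of p whose first character is c
def pvG (c : Char) (p : List String) : List String := p.filter (fun card => pvHd card == c)
-- the i-th "V" card of p, as a 0- or 1-element list
def pvSl (i : Nat) (p : List String) : List String := ((pvG 'V' p).drop i).take 1
-- invariant of A's scan after processing the cells p
def pvInvA (p : List String) (st : List (List String) × Int) : Prop :=
  ∃ a b c d, st.1 = [a, b, c, d] ∧ st.2 = ((pvG 'V' p).length : Int) ∧
    a.Perm (pvG 'C' p ++ pvSl 0 p) ∧ b.Perm (pvG 'D' p ++ pvSl 1 p) ∧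
    c.Perm (pvG 'H' p ++ pvSl 2 p) ∧ d.Perm (pvG 'S' p ++ pvSl 3 p)

theorem pvKey_of_ne (card : String) (h : card ≠ "") :
    PySem.Str.pyGet? card 0 = some (pvHd card) := by
  have hl : card.toList ≠ [] := by
    intro hnil; exact h (by rwa [← String.toList_eq_nil_iff])
  cases hc : card.toList with
  | nil => exact absurd hc hl
  | cons y ys =>
    have : PySem.Str.pyGet? card ((0:Nat):Int) = card.toList[(0:Nat)]? := PySem.Str.pyGet?_natCast ..
    simp only [Int.natCast_zero] at this
    rw [this, hc]
    simp [pvHd, hc]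
theorem pvG_snoc (c : Char) (p : List String) (x : String) :
    pvG c (p ++ [x]) = pvG c p ++ (if pvHd x == c then [x] else []) := by
  simp only [pvG, List.filter_append]
  congr 1
  by_cases h : pvHd x == c <;> simp [List.filter, h]
theorem pvSl_snoc_V (p : List String) (x : String) (hx : pvHd x = 'V') (i : Nat) :
    pvSl i (p ++ [x]) = if i = (pvG 'V' p).length then [x] else pvSl i p := by
  have hG : pvG 'V' (p ++ [x]) = pvG 'V' p ++ [x] := by
    rw [pvG_snoc]; simp [hx]
  simp only [pvSl, hG]
  set u := pvG 'V' p with hu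
  rcases lt_trichotomy i u.length with h | h | h
  · rw [if_neg (by omega), List.drop_append_of_le_length (by omega),
      List.take_append_of_le_length (by simp [List.length_drop]; omega)]
  · rw [if_pos h, h, List.drop_left]; rfl
  · rw [if_neg (by omega), List.drop_eq_nil_of_le (by simp; omega),
      List.drop_eq_nil_of_le (by omega)]
theorem pvSl_snoc_nonV (p : List String) (x : String) (hx : ¬ pvHd x = 'V') (i : Nat) :
    pvSl i (p ++ [x]) = pvSl i p := by
  simp only [pvSl]; rw [pvG_snoc]; simp [hx]
theorem pvPerm_rot (u v : List String) (x : String) : (u ++ v ++ [x]).Perm (u ++ [x] ++ v) := by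
  rw [List.append_assoc, List.append_assoc]
  exact List.Perm.append_left u List.perm_append_comm

theorem pvInvA_step (p : List String) (x : String) (st : List (List String) × Int)
    (hinv : pvInvA p st) (hx : x ≠ "")
    (hb : (pvG 'V' (p ++ [x])).length ≤ 4) :
    pvInvA (p ++ [x]) (pvStepA st x) := by
  obtain ⟨a, b, c, d, h1, h2, hpa, hpb, hpc, hpd⟩ := hinv
  have hkey := pvKey_of_ne x hx
  have hGV : pvG 'V' (p ++ [x]) = pvG 'V' p ++ (if pvHd x == 'V' then [x] else []) := pvG_snoc _ _ _
  by_cases hC : pvHd x = 'C'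
  · have hstep : pvStepA st x = ([a ++ [x], b, c, d], st.2) := by
      unfold pvStepA
      rw [hkey, hC, h1]
      simp [PySem.List.pySetD, PySem.List.pySet?, PySem.List.pyGetD, PySem.List.pyGet?, PySem.List.pyIdx?]
    rw [hstep]
    refine ⟨a ++ [x], b, c, d, rfl, ?_, ?_, ?_, ?_, ?_⟩
    · rw [h2, hGV]; simp [hC]
    · rw [pvG_snoc, pvSl_snoc_nonV p x (by simp [hC]) 0]
      simp only [hC]
      exact (hpa.append_right [x]).trans (by simpa using pvPerm_rot (pvG 'C' p) (pvSl 0 p) x)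
    · rw [pvG_snoc, pvSl_snoc_nonV p x (by simp [hC]) 1]; simpa [hC] using hpb
    · rw [pvG_snoc, pvSl_snoc_nonV p x (by simp [hC]) 2]; simpa [hC] using hpc
    · rw [pvG_snoc, pvSl_snoc_nonV p x (by simp [hC]) 3]; simpa [hC] using hpd
  by_cases hD : pvHd x = 'D'
  · have hstep : pvStepA st x = ([a, b ++ [x], c, d], st.2) := by
      unfold pvStepA
      rw [hkey, hD, h1]
      simp [PySem.List.pySetD, PySem.List.pySet?, PySem.List.pyGetD, PySem.List.pyGet?, PySem.List.pyIdx?]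
    rw [hstep]
    refine ⟨a, b ++ [x], c, d, rfl, ?_, ?_, ?_, ?_, ?_⟩
    · rw [h2, hGV]; simp [hD]
    · rw [pvG_snoc, pvSl_snoc_nonV p x (by simp [hD]) 0]; simpa [hD] using hpa
    · rw [pvG_snoc, pvSl_snoc_nonV p x (by simp [hD]) 1]
      simp only [hD]
      exact (hpb.append_right [x]).trans (by simpa using pvPerm_rot (pvG 'D' p) (pvSl 1 p) x)
    · rw [pvG_snoc, pvSl_snoc_nonV p x (by simp [hD]) 2]; simpa [hD] using hpc
    · rw [pvG_snoc, pvSl_snoc_nonV p x (by simp [hD]) 3]; simpa [hD] using hpd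
  by_cases hH : pvHd x = 'H'
  · have hstep : pvStepA st x = ([a, b, c ++ [x], d], st.2) := by
      unfold pvStepA
      rw [hkey, hH, h1]
      simp [PySem.List.pySetD, PySem.List.pySet?, PySem.List.pyGetD, PySem.List.pyGet?, PySem.List.pyIdx?]
    rw [hstep]
    refine ⟨a, b, c ++ [x], d, rfl, ?_, ?_, ?_, ?_, ?_⟩
    · rw [h2, hGV]; simp [hH]
    · rw [pvG_snoc, pvSl_snoc_nonV p x (by simp [hH]) 0]; simpa [hH] using hpa
    · rw [pvG_snoc, pvSl_snoc_nonV p x (by simp [hH]) 1]; simpa [hH] using hpb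
    · rw [pvG_snoc, pvSl_snoc_nonV p x (by simp [hH]) 2]
      simp only [hH]
      exact (hpc.append_right [x]).trans (by simpa using pvPerm_rot (pvG 'H' p) (pvSl 2 p) x)
    · rw [pvG_snoc, pvSl_snoc_nonV p x (by simp [hH]) 3]; simpa [hH] using hpd
  by_cases hS : pvHd x = 'S'
  · have hstep : pvStepA st x = ([a, b, c, d ++ [x]], st.2) := by
      unfold pvStepA
      rw [hkey, hS, h1]
      simp [PySem.List.pySetD, PySem.List.pySet?, PySem.List.pyGetD, PySem.List.pyGet?, PySem.List.pyIdx?]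
    rw [hstep]
    refine ⟨a, b, c, d ++ [x], rfl, ?_, ?_, ?_, ?_, ?_⟩
    · rw [h2, hGV]; simp [hS]
    · rw [pvG_snoc, pvSl_snoc_nonV p x (by simp [hS]) 0]; simpa [hS] using hpa
    · rw [pvG_snoc, pvSl_snoc_nonV p x (by simp [hS]) 1]; simpa [hS] using hpb
    · rw [pvG_snoc, pvSl_snoc_nonV p x (by simp [hS]) 2]; simpa [hS] using hpc
    · rw [pvG_snoc, pvSl_snoc_nonV p x (by simp [hS]) 3]
      simp only [hS]
      exact (hpd.append_right [x]).trans (by simpa using pvPerm_rot (pvG 'S' p) (pvSl 3 p) x)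
  by_cases hV : pvHd x = 'V'
  · have hGVx : pvG 'V' (p ++ [x]) = pvG 'V' p ++ [x] := by rw [hGV]; simp [hV]
    have hk4 : (pvG 'V' p).length + 1 ≤ 4 := by
      have := hb; rw [hGVx] at this; simpa using this
    have hslk : pvSl (pvG 'V' p).length p = [] := by
      simp [pvSl, List.drop_eq_nil_of_le]
    have hkcase : (pvG 'V' p).length = 0 ∨ (pvG 'V' p).length = 1 ∨ (pvG 'V' p).length = 2 ∨ (pvG 'V' p).length = 3 := by omega
    rcases hkcase with hk | hk | hk | hk
    · have hstep : pvStepA st x = ([a ++ [x], b, c, d], st.2 + 1) := by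
        unfold pvStepA
        rw [hkey, hV, h1, h2, hk]
        simp [PySem.List.pySetD, PySem.List.pySet?, PySem.List.pyGetD, PySem.List.pyGet?, PySem.List.pyIdx?]
      rw [hstep]
      refine ⟨a ++ [x], b, c, d, rfl, ?_, ?_, ?_, ?_, ?_⟩
      · rw [h2, hGVx]
        simp only [List.length_append, List.length_cons, List.length_nil]
        push_cast
        ring
      · rw [pvG_snoc, pvSl_snoc_V p x hV 0]
        simp only [hk]
        have h0 : pvSl 0 p = [] := by rw [← hk]; exact hslk
        rw [h0] at hpa
        simp only [hV]
        simpa using (show a.Perm (pvG 'C' p) by simpa using hpa).append_right [x]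
      · rw [pvG_snoc, pvSl_snoc_V p x hV 1]
        simp only [hk]
        simpa [hV] using hpb
      · rw [pvG_snoc, pvSl_snoc_V p x hV 2]
        simp only [hk]
        simpa [hV] using hpc
      · rw [pvG_snoc, pvSl_snoc_V p x hV 3]
        simp only [hk]
        simpa [hV] using hpd
    · have hstep : pvStepA st x = ([a, b ++ [x], c, d], st.2 + 1) := by
        unfold pvStepA
        rw [hkey, hV, h1, h2, hk]
        simp [PySem.List.pySetD, PySem.List.pySet?, PySem.List.pyGetD, PySem.List.pyGet?, PySem.List.pyIdx?]
      rw [hstep]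
      refine ⟨a, b ++ [x], c, d, rfl, ?_, ?_, ?_, ?_, ?_⟩
      · rw [h2, hGVx]
        simp only [List.length_append, List.length_cons, List.length_nil]
        push_cast
        ring
      · rw [pvG_snoc, pvSl_snoc_V p x hV 0]
        simp only [hk]
        simpa [hV] using hpa
      · rw [pvG_snoc, pvSl_snoc_V p x hV 1]
        simp only [hk]
        have h0 : pvSl 1 p = [] := by rw [← hk]; exact hslk
        rw [h0] at hpb
        simp only [hV]
        simpa using (show b.Perm (pvG 'D' p) by simpa using hpb).append_right [x]
      · rw [pvG_snoc, pvSl_snoc_V p x hV 2]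
        simp only [hk]
        simpa [hV] using hpc
      · rw [pvG_snoc, pvSl_snoc_V p x hV 3]
        simp only [hk]
        simpa [hV] using hpd
    · have hstep : pvStepA st x = ([a, b, c ++ [x], d], st.2 + 1) := by
        unfold pvStepA
        rw [hkey, hV, h1, h2, hk]
        simp [PySem.List.pySetD, PySem.List.pySet?, PySem.List.pyGetD, PySem.List.pyGet?, PySem.List.pyIdx?]
      rw [hstep]
      refine ⟨a, b, c ++ [x], d, rfl, ?_, ?_, ?_, ?_, ?_⟩
      · rw [h2, hGVx]
        simp only [List.length_append, List.length_cons, List.length_nil]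
        push_cast
        ring
      · rw [pvG_snoc, pvSl_snoc_V p x hV 0]
        simp only [hk]
        simpa [hV] using hpa
      · rw [pvG_snoc, pvSl_snoc_V p x hV 1]
        simp only [hk]
        simpa [hV] using hpb
      · rw [pvG_snoc, pvSl_snoc_V p x hV 2]
        simp only [hk]
        have h0 : pvSl 2 p = [] := by rw [← hk]; exact hslk
        rw [h0] at hpc
        simp only [hV]
        simpa using (show c.Perm (pvG 'H' p) by simpa using hpc).append_right [x]
      · rw [pvG_snoc, pvSl_snoc_V p x hV 3]
        simp only [hk]
        simpa [hV] using hpd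
    · have hstep : pvStepA st x = ([a, b, c, d ++ [x]], st.2 + 1) := by
        unfold pvStepA
        rw [hkey, hV, h1, h2, hk]
        simp [PySem.List.pySetD, PySem.List.pySet?, PySem.List.pyGetD, PySem.List.pyGet?, PySem.List.pyIdx?]
      rw [hstep]
      refine ⟨a, b, c, d ++ [x], rfl, ?_, ?_, ?_, ?_, ?_⟩
      · rw [h2, hGVx]
        simp only [List.length_append, List.length_cons, List.length_nil]
        push_cast
        ring
      · rw [pvG_snoc, pvSl_snoc_V p x hV 0]
        simp only [hk]
        simpa [hV] using hpa
      · rw [pvG_snoc, pvSl_snoc_V p x hV 1]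
        simp only [hk]
        simpa [hV] using hpb
      · rw [pvG_snoc, pvSl_snoc_V p x hV 2]
        simp only [hk]
        simpa [hV] using hpc
      · rw [pvG_snoc, pvSl_snoc_V p x hV 3]
        simp only [hk]
        have h0 : pvSl 3 p = [] := by rw [← hk]; exact hslk
        rw [h0] at hpd
        simp only [hV]
        simpa using (show d.Perm (pvG 'S' p) by simpa using hpd).append_right [x]
  · have hstep : pvStepA st x = st := by
      unfold pvStepA
      rw [hkey]
      simp [hC, hD, hH, hS, hV]
    rw [hstep]
    refine ⟨a, b, c, d, h1, ?_, ?_, ?_, ?_, ?_⟩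
    · rw [h2, hGV]; simp [hV]
    · rw [pvG_snoc, pvSl_snoc_nonV p x hV 0]; simpa [hC, hD, hH, hS] using hpa
    · rw [pvG_snoc, pvSl_snoc_nonV p x hV 1]; simpa [hC, hD, hH, hS] using hpb
    · rw [pvG_snoc, pvSl_snoc_nonV p x hV 2]; simpa [hC, hD, hH, hS] using hpc
    · rw [pvG_snoc, pvSl_snoc_nonV p x hV 3]; simpa [hC, hD, hH, hS] using hpd

theorem pvMapRange_take {α : Type} (xs : List α) (n : Int) (hn : n ≤ (xs.length : Int)) (d : α) :
    (PySem.List.pyRange 0 n 1).map (fun j => PySem.List.pyGetD xs j d) = xs.take n.toNat := by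
  rw [PySem.List.pyRange_one]
  simp only [Int.sub_zero, List.map_map]
  apply List.ext_getElem
  · simp [Int.toNat_le]; omega
  · intro k h1 h2
    simp only [List.getElem_map, List.getElem_range, Function.comp_apply, List.getElem_take]
    have hk : k < xs.length := by simp at h1; omega
    rw [show ((0:Int) + (k:Int)) = ((k:Nat):Int) by omega]
    rw [PySem.List.pyGetD_natCast]
    exact List.getD_eq_getElem _ _ hk

theorem pvFold_cells {β : Type} (f : β → String → β) (init : β)
    (shuffled : List (List String)) (lignes colonnes : Int)
    (h1 : lignes ≤ (shuffled.length : Int))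
    (h2 : ∀ row ∈ shuffled.take lignes.toNat, colonnes + 1 ≤ (row.length : Int)) :
    (PySem.List.pyRange 0 lignes 1).foldl (fun st y =>
      (PySem.List.pyRange 0 (colonnes + 1) 1).foldl (fun st x =>
        f st (PySem.List.pyGetD (PySem.List.pyGetD shuffled y []) x "")) st) init
    = (pvCells shuffled lignes colonnes).foldl f init := by
  rw [PySem.List.foldl_congr_mem (PySem.List.pyRange 0 lignes 1) _
    (fun st y => ((PySem.List.pyGetD shuffled y []).take (colonnes + 1).toNat).foldl f st) init ?_]
  · rw [show (fun (st : β) (y : Int) => ((PySem.List.pyGetD shuffled y []).take (colonnes + 1).toNat).foldl f st)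
        = (fun st y => (fun (st : β) (row : List String) => row.foldl f st) st ((fun y => (PySem.List.pyGetD shuffled y []).take (colonnes + 1).toNat) y)) from rfl]
    rw [← List.foldl_map]
    have hmap : (PySem.List.pyRange 0 lignes 1).map (fun y => (PySem.List.pyGetD shuffled y []).take (colonnes + 1).toNat)
        = (shuffled.take lignes.toNat).map (fun row => row.take (colonnes + 1).toNat) := by
      rw [← pvMapRange_take shuffled lignes h1 [], List.map_map]
      rfl
    rw [hmap, ← List.foldl_flatten, pvCells, List.flatMap_def]
  · intro st y hy
    rw [PySem.List.mem_pyRange_one] at hy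
    have hrow : PySem.List.pyGetD shuffled y [] ∈ shuffled.take lignes.toNat := by
      rw [PySem.List.pyGetD_eq_getElem _ _ hy.1 (by omega)]
      have hyt : y.toNat < (shuffled.take lignes.toNat).length := by
        simp [List.length_take]; omega
      have := List.getElem_take (xs := shuffled) (h := hyt)
      rw [← this]
      exact List.getElem_mem _
    dsimp only
    rw [← pvMapRange_take (PySem.List.pyGetD shuffled y []) (colonnes + 1) (h2 _ hrow) ""]
    rw [List.foldl_map]

-- B's flattening comprehension computes exactly the cells A scans
theorem pvCellsB_eq (shuffled : List (List String)) (lignes colonnes : Int)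
    (h1 : lignes ≤ (shuffled.length : Int))
    (h2 : ∀ row ∈ shuffled.take lignes.toNat, colonnes + 1 ≤ (row.length : Int)) :
    (PySem.List.pyRange 0 lignes 1).flatMap (fun y =>
      (PySem.List.pyRange 0 (colonnes + 1) 1).map (fun x =>
        PySem.List.pyGetD (PySem.List.pyGetD shuffled y []) x ""))
    = pvCells shuffled lignes colonnes := by
  rw [List.flatMap_def]
  rw [List.map_congr_left (f := fun y => (PySem.List.pyRange 0 (colonnes + 1) 1).map (fun x =>
        PySem.List.pyGetD (PySem.List.pyGetD shuffled y []) x ""))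
    (g := fun y => (PySem.List.pyGetD shuffled y []).take (colonnes + 1).toNat) ?_]
  · have hmap : (PySem.List.pyRange 0 lignes 1).map (fun y => (PySem.List.pyGetD shuffled y []).take (colonnes + 1).toNat)
        = (shuffled.take lignes.toNat).map (fun row => row.take (colonnes + 1).toNat) := by
      rw [← pvMapRange_take shuffled lignes h1 [], List.map_map]
      rfl
    rw [hmap, pvCells, List.flatMap_def]
  · intro y hy
    rw [PySem.List.mem_pyRange_one] at hy
    have hrow : PySem.List.pyGetD shuffled y [] ∈ shuffled.take lignes.toNat := by
      rw [PySem.List.pyGetD_eq_getElem _ _ hy.1 (by omega)]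
      have hyt : y.toNat < (shuffled.take lignes.toNat).length := by
        simp [List.length_take]; omega
      have := List.getElem_take (xs := shuffled) (h := hyt)
      rw [← this]
      exact List.getElem_mem _
    exact pvMapRange_take (PySem.List.pyGetD shuffled y []) (colonnes + 1) (h2 _ hrow) ""

-- B's flattening comprehension is empty when either loop range is empty
theorem pvCellsB_deg (shuffled : List (List String)) (lignes colonnes : Int)
    (h : lignes ≤ 0 ∨ colonnes + 1 ≤ 0) :
    (PySem.List.pyRange 0 lignes 1).flatMap (fun y =>
      (PySem.List.pyRange 0 (colonnes + 1) 1).map (fun x =>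
        PySem.List.pyGetD (PySem.List.pyGetD shuffled y []) x ""))
    = [] := by
  rcases h with h | h
  · rw [PySem.List.pyRange_one_eq_nil h]; rfl
  · rw [List.flatMap_eq_nil_iff]
    intro y _
    rw [PySem.List.pyRange_one_eq_nil h]
    rfl

-- under "no empty card", B's per-suit filter is pvG
theorem pvFilter_eq_pvG (cs : List String) (hne : ∀ x ∈ cs, x ≠ "") (c : Char) :
    cs.filter (fun card => PySem.Str.pyGet? card 0 == some c) = pvG c cs := by
  apply List.filter_congr
  intro card hcard
  rw [pvKey_of_ne card (hne card hcard)]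
  simp

theorem pvInvA_foldl (cs : List String) (p : List String) (st : List (List String) × Int)
    (hinv : pvInvA p st) (hne : ∀ x ∈ cs, x ≠ "")
    (hb : (pvG 'V' (p ++ cs)).length ≤ 4) :
    pvInvA (p ++ cs) (cs.foldl pvStepA st) := by
  induction cs generalizing p st with
  | nil => simpa using hinv
  | cons x t ih =>
    have hx : x ≠ "" := hne x (by simp)
    have hassoc : p ++ x :: t = (p ++ [x]) ++ t := by simp
    rw [List.foldl_cons, hassoc]
    rw [hassoc] at hb
    have hsplit : pvG 'V' ((p ++ [x]) ++ t) = pvG 'V' (p ++ [x]) ++ pvG 'V' t := by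
      unfold pvG; exact List.filter_append ..
    apply ih
    · apply pvInvA_step p x st hinv hx
      rw [hsplit, List.length_append] at hb
      omega
    · intro y hy; exact hne y (by simp [hy])
    · exact hb

theorem pvFold_deg {β : Type} (f : β → String → β) (init : β)
    (shuffled : List (List String)) (lignes colonnes : Int)
    (h : lignes ≤ 0 ∨ colonnes + 1 ≤ 0) :
    (PySem.List.pyRange 0 lignes 1).foldl (fun st y =>
      (PySem.List.pyRange 0 (colonnes + 1) 1).foldl (fun st x =>
        f st (PySem.List.pyGetD (PySem.List.pyGetD shuffled y []) x "")) st) init = init := by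
  rcases h with h | h
  · rw [PySem.List.pyRange_one_eq_nil h]
    rfl
  · rw [PySem.List.foldl_congr_mem _ _ (fun st _ => st) init ?_]
    · exact PySem.List.foldl_ignore ..
    · intro st y _
      rw [PySem.List.pyRange_one_eq_nil h]
      rfl

theorem cheat_ordonne_spec : Claim_equal_cheat_ordonne := by
  intro shuffled lignes colonnes _ hpre
  rcases hpre with hdeg | ⟨h1, h2, h3, h4⟩
  · unfold Spec_cheat_ordonne
    simp only [cheat_ordonne, cheat_ordonne_alt]
    rw [pvFold_deg pvStepA ([[], [], [], []], 0) shuffled lignes colonnes hdeg]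
    rw [pvCellsB_deg shuffled lignes colonnes hdeg]
    rfl
  unfold Spec_cheat_ordonne
  simp only [cheat_ordonne, cheat_ordonne_alt]
  rw [pvFold_cells pvStepA ([[], [], [], []], 0) shuffled lignes colonnes h1 h2]
  rw [pvCellsB_eq shuffled lignes colonnes h1 h2]
  set cells := pvCells shuffled lignes colonnes with hcells
  have hbound : (pvG 'V' cells).length ≤ 4 := by
    have hcnt : cells.countP (fun card => PySem.Str.pyGet? card 0 == some 'V')
        = cells.countP (fun card => pvHd card == 'V') := by
      apply List.countP_congr
      intro card hcard
      rw [pvKey_of_ne card (h3 card hcard)]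
      simp
    unfold pvG
    rw [← List.countP_eq_length_filter, ← hcnt]
    exact h4
  have hinv0 : pvInvA [] ([[], [], [], []], (0 : Int)) :=
    ⟨[], [], [], [], rfl, by simp [pvG], by simp [pvG, pvSl], by simp [pvG, pvSl],
      by simp [pvG, pvSl], by simp [pvG, pvSl]⟩
  have hinv := pvInvA_foldl cells [] ([[], [], [], []], (0 : Int)) hinv0 h3 (by simpa using hbound)
  rw [List.nil_append] at hinv
  obtain ⟨a, b, c, d, hA1, _, hpa, hpb, hpc, hpd⟩ := hinv
  rw [hA1]
  have henum : PySem.List.enumerate ['C', 'D', 'H', 'S'] (0 : Int)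
      = [(0, 'C'), (1, 'D'), (2, 'H'), (3, 'S')] := by decide
  rw [henum]
  simp only [List.map_cons, List.map_nil]
  rw [pvFilter_eq_pvG cells h3 'C', pvFilter_eq_pvG cells h3 'D', pvFilter_eq_pvG cells h3 'H',
    pvFilter_eq_pvG cells h3 'S', pvFilter_eq_pvG cells h3 'V']
  rw [show ((0:Int)) = ((0:Nat):Int) from rfl, show ((1:Int)) = ((1:Nat):Int) from rfl,
    show ((2:Int)) = ((2:Nat):Int) from rfl, show ((3:Int)) = ((3:Nat):Int) from rfl]
  simp only [PySem.List.pySetD, PySem.List.pySet?, PySem.List.pyGetD, PySem.List.pyGet?,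
    PySem.List.pyIdx?]
  norm_num
  simp only [Int.reduceToNat]
  simp only [List.set, List.getElem_cons_succ, List.getElem_cons_zero, List.cons.injEq, and_true]
  have hsl0 : pvSl 0 cells = (pvG 'V' cells).take 1 := by simp [pvSl]
  have hsl1 : pvSl 1 cells = ((pvG 'V' cells).drop 1).take 1 := rfl
  have hsl2 : pvSl 2 cells = ((pvG 'V' cells).drop 2).take 1 := rfl
  have hsl3 : pvSl 3 cells = ((pvG 'V' cells).drop 3).take 1 := rfl
  rw [hsl0] at hpa
  rw [hsl1, List.drop_one] at hpb
  rw [hsl2] at hpc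
  rw [hsl3] at hpd
  refine ⟨?_, ?_, ?_, ?_⟩
  · rw [show ((1:Int)) = ((1:Nat):Int) from rfl, PySem.List.slice_to_natCast]
    exact PySem.List.sorted_eq_sorted_of_perm _ _ _ (fun _ _ h => h) hpa
  · rw [show ((1:Int)) = ((1:Nat):Int) from rfl, show ((2:Int)) = ((2:Nat):Int) from rfl,
      PySem.List.slice_natCast]
    norm_num
    exact PySem.List.sorted_eq_sorted_of_perm _ _ _ (fun _ _ h => h) hpb
  · rw [show ((2:Int)) = ((2:Nat):Int) from rfl, show ((3:Int)) = ((3:Nat):Int) from rfl,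
      PySem.List.slice_natCast]
    norm_num
    exact PySem.List.sorted_eq_sorted_of_perm _ _ _ (fun _ _ h => h) hpc
  · rw [show ((3:Int)) = ((3:Nat):Int) from rfl, show ((4:Int)) = ((4:Nat):Int) from rfl,
      PySem.List.slice_natCast]
    norm_num
    exact PySem.List.sorted_eq_sorted_of_perm _ _ _ (fun _ _ h => h) hpd
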